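-- pv_equiv track=rewrite | github.com/yeongyeongGong/algorithm_study | SY/week6/package.py | solution
-- ===== SOURCE A (Python) =====
-- def solution(order):
--     answer = 0
--     n = len(order)
--     cb = [i for i in range(1, n + 1)]  # 메인 컨베이어: 1부터 N까지
--     sub_cb = []  # 보조 컨베이어 (스택)
--     idx = 0  # order 순회 인덱스
--
--     for box in cb:
--         sub_cb.append(box)
--
--         while sub_cb and sub_cb[-1] == order[idx]:
--             sub_cb.pop()
--             answer += 1
--             idx += 1
--             if idx == n:
--                 break
--
--     return answer
-- ===== SOURCE B (Python) =====
-- def solution(order):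
--     n = len(order)
--     answer = 0
--     next_box = 1  # next box still on the main conveyor
--     stack = []
--     for target in order:
--         if stack and stack[-1] == target:
--             stack.pop()
--             answer += 1
--         elif next_box <= target <= n:
--             # move boxes next_box..target-1 onto the stack, load target directly
--             for b in range(next_box, target):
--                 stack.append(b)
--             next_box = target + 1
--             answer += 1
--         else:
--             break
--     return answer
-- ===== Notes on version B (the rewrite author's own statement) =====
-- stated objective: faster
-- what changed: B drives the loop over the demand sequence `order` (lazily pushing conveyor boxes up to each target, breaking as soon as a target is unreachable) instead of A's loop over the whole conveyor with an inner greedy pop-while; one recursion over order with no per-box inner loop and early exit gives a constant-factor speedup.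
import Mathlib
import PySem

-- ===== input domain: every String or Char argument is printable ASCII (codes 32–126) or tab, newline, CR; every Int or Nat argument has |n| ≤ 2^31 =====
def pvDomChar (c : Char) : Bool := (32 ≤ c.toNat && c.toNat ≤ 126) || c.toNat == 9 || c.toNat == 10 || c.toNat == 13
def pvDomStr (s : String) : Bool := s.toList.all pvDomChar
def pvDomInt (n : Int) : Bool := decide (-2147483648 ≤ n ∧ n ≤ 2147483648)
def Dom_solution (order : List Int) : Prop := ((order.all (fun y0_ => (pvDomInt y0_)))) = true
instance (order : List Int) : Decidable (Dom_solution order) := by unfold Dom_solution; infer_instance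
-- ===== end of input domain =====

-- B re-implements the box-loading count demand-driven over `order` (lazy pushes, early break)
-- instead of A's supply-driven conveyor loop with an inner pop-while; same value everywhere.

-- ===== PORT A =====
-- the inner `while sub_cb and sub_cb[-1] == order[idx]: sub_cb.pop(); answer+=1; idx+=1; if idx==n: break`
def solWhile (order : List Int) (n : Int) (sub : List Int) (ans idx : Int) :
    List Int × Int × Int :=
  if sub ≠ [] ∧ PySem.List.pyGet? sub (-1) = PySem.List.pyGet? order idx then
    if idx + 1 = n then (sub.dropLast, ans + 1, idx + 1)   -- break
    else solWhile order n sub.dropLast (ans + 1) (idx + 1)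
  else (sub, ans, idx)
termination_by sub.length
decreasing_by
  rename_i h1 _
  cases sub with
  | nil => exact absurd rfl h1.1
  | cons a l => simp only [List.length_dropLast, List.length_cons]; omega

def solution (order : List Int) : Int :=
  let n : Int := order.length
  let cb := PySem.List.pyRange 1 (n + 1) 1
  (cb.foldl (fun st box => solWhile order n (st.1 ++ [box]) st.2.1 st.2.2)
      (([] : List Int), (0 : Int), (0 : Int))).2.1

-- ===== PORT B =====
-- `for target in order:` with a break, as structural recursion over `order`
def altLoop (n : Int) : List Int → List Int → Int → Int → Int
  | [], _, _, ans => ans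
  | t :: rest, stack, next, ans =>
    if stack ≠ [] ∧ PySem.List.pyGet? stack (-1) = some t then
      altLoop n rest stack.dropLast next (ans + 1)
    else if next ≤ t ∧ t ≤ n then
      altLoop n rest (stack ++ PySem.List.pyRange next t 1) (t + 1) (ans + 1)
    else ans

def solution_alt (order : List Int) : Int :=
  altLoop order.length order [] 1 0

-- ===== PRECONDITION & SPEC =====
def Spec_solution (order : List Int) (out : Int) : Prop := out = solution_alt order
instance (order : List Int) (out : Int) : Decidable (Spec_solution order out) := by unfold Spec_solution; infer_instance

-- ===== CLAIM (what is proved, stated in full; the proofs are below) =====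
def Claim_equal_solution : Prop := ∀ (order : List Int), Dom_solution order → Spec_solution order (solution order)

-- ===== LEMMAS AND PROOFS =====

theorem pyGet?_len_none (order : List Int) :
    PySem.List.pyGet? order ((order.length : Nat) : Int) = none := by
  rw [PySem.List.pyGet?_natCast]; simp

theorem solWhile_id {order : List Int} {n : Int} {sub : List Int} {ans idx : Int}
    (h : ¬ (sub ≠ [] ∧ PySem.List.pyGet? sub (-1) = PySem.List.pyGet? order idx)) :
    solWhile order n sub ans idx = (sub, ans, idx) := by
  rw [solWhile]; simp [h]

-- one iteration of the while (the internal break is absorbed: past the break the loop is the identity)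
theorem solWhile_pop (order : List Int) {sub : List Int} (ans idx : Int)
    (hne : sub ≠ []) (htop : PySem.List.pyGet? sub (-1) = PySem.List.pyGet? order idx) :
    solWhile order (order.length : Int) sub ans idx
      = solWhile order (order.length : Int) sub.dropLast (ans + 1) (idx + 1) := by
  rw [solWhile, if_pos ⟨hne, htop⟩]
  split_ifs with hbrk
  · rw [solWhile_id]
    rintro ⟨hne2, habs⟩
    rw [hbrk, pyGet?_len_none, PySem.List.pyGet?_neg_one, List.getLast?_eq_none_iff] at habs
    exact hne2 habs
  · rfl

-- W: the pops done by one run of A's inner while are exactly a maximal chain of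
-- B's top-match steps; the result is a while-fixpoint and a sublist of the stack.
theorem solWhile_altLoop (order : List Int) (sub : List Int) (ans : Int) (j : Nat) :
    ∃ (S' : List Int) (a' : Int) (j' : Nat),
      solWhile order (order.length : Int) sub ans (j : Int) = (S', a', (j' : Int)) ∧
      (∀ next, altLoop (order.length : Int) (order.drop j) sub next ans
             = altLoop (order.length : Int) (order.drop j') S' next a') ∧
      ¬ (S' ≠ [] ∧ PySem.List.pyGet? S' (-1) = PySem.List.pyGet? order (j' : Int)) ∧
      S'.Sublist sub := by
  by_cases h : sub ≠ [] ∧ PySem.List.pyGet? sub (-1) = PySem.List.pyGet? order (j : Int)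
  · obtain ⟨hne, htop⟩ := h
    rcases ht : PySem.List.pyGet? order (j : Int) with _ | t
    · rw [ht, PySem.List.pyGet?_neg_one, List.getLast?_eq_none_iff] at htop
      exact absurd htop hne
    · have hj : j < order.length := by
        by_contra hge
        rw [PySem.List.pyGet?_natCast, List.getElem?_eq_none (le_of_not_gt hge)] at ht
        simp at ht
      have hdrop : order.drop j = order[j] :: order.drop (j + 1) :=
        List.drop_eq_getElem_cons hj
      have htval : t = order[j] := by
        rw [PySem.List.pyGet?_natCast, List.getElem?_eq_getElem hj] at ht
        exact (Option.some.inj ht).symm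
      have hstep := solWhile_pop order ans (j : Int) hne htop
      have hlt : sub.dropLast.length < sub.length := by
        cases sub with
        | nil => exact absurd rfl hne
        | cons a l => simp
      obtain ⟨S', a', j', heq, halt, hfix, hsub⟩ :=
        solWhile_altLoop order sub.dropLast (ans + 1) (j + 1)
      refine ⟨S', a', j', ?_, ?_, hfix, hsub.trans (List.dropLast_sublist sub)⟩
      · rw [hstep, ← heq]; norm_cast
      · intro next
        rw [hdrop, ← halt next]
        have hcond : (sub ≠ [] ∧ PySem.List.pyGet? sub (-1) = some order[j]) :=
          ⟨hne, by rw [htop, ht, htval]⟩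
        simp only [altLoop, if_pos hcond]
  · exact ⟨sub, ans, j, solWhile_id h, fun _ => rfl, h, List.Sublist.refl _⟩
termination_by sub.length
decreasing_by exact hlt

-- identity steps of A's outer fold: boxes whose push can never match order[j]
theorem fold_id (order : List Int) (L : List Int) (S : List Int) (ans : Int) (j : Nat)
    (h : ∀ b ∈ L, some b ≠ PySem.List.pyGet? order (j : Int)) :
    L.foldl (fun st box => solWhile order (order.length : Int) (st.1 ++ [box]) st.2.1 st.2.2)
        (S, ans, (j : Int)) = (S ++ L, ans, (j : Int)) := by
  induction L generalizing S with
  | nil => simp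
  | cons b L ih =>
    simp only [List.foldl_cons]
    rw [solWhile_id, ih]
    · simp
    · intro c hc; exact h c (List.mem_cons_of_mem _ hc)
    · rintro ⟨-, habs⟩
      rw [PySem.List.pyGet?_neg_one_append_singleton] at habs
      exact h b List.mem_cons_self habs

-- G: the supply-driven fold over the remaining conveyor equals B's demand-driven loop,
-- from any while-fixpoint state whose stack holds only boxes below the next conveyor box.
theorem fold_altLoop (order : List Int) (m : Int) (hm : 1 ≤ m) (S : List Int) (ans : Int)
    (j : Nat) (hS : ∀ x ∈ S, x < m)
    (hfix : ¬ (S ≠ [] ∧ PySem.List.pyGet? S (-1) = PySem.List.pyGet? order (j : Int))) :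
    ((PySem.List.pyRange m ((order.length : Int) + 1) 1).foldl
        (fun st box => solWhile order (order.length : Int) (st.1 ++ [box]) st.2.1 st.2.2)
        (S, ans, (j : Int))).2.1
      = altLoop (order.length : Int) (order.drop j) S m ans := by
  rcases Nat.lt_or_ge j order.length with hj | hj
  · have hdrop : order.drop j = order[j] :: order.drop (j + 1) :=
      List.drop_eq_getElem_cons hj
    set t := order[j] with htdef
    have hget : PySem.List.pyGet? order (j : Int) = some t := by
      rw [PySem.List.pyGet?_natCast, List.getElem?_eq_getElem hj]
    have hnotA : ¬ (S ≠ [] ∧ PySem.List.pyGet? S (-1) = some t) := by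
      rintro ⟨hne, htop⟩
      exact hfix ⟨hne, by rw [htop, hget]⟩
    by_cases hrange : m ≤ t ∧ t ≤ (order.length : Int)
    · -- B pushes m..t-1 and loads t; A pushes m..t with identity steps, then pops t (and more)
      have hsplit : PySem.List.pyRange m ((order.length : Int) + 1) 1
          = PySem.List.pyRange m t 1 ++ (t :: PySem.List.pyRange (t + 1) ((order.length : Int) + 1) 1) := by
        rw [← PySem.List.pyRange_one_cons (by omega)]
        exact PySem.List.pyRange_one_append m t ((order.length : Int) + 1) hrange.1 (by omega)
      rw [hsplit, List.foldl_append, fold_id]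
      · simp only [List.foldl_cons]
        have hstep := solWhile_pop order ans (j : Int)
          (sub := S ++ PySem.List.pyRange m t 1 ++ [t]) (by simp)
          (by rw [PySem.List.pyGet?_neg_one_append_singleton, hget])
        rw [List.dropLast_concat] at hstep
        rw [hstep]
        obtain ⟨S', a', j', heq, halt, hfix', hsub⟩ :=
          solWhile_altLoop order (S ++ PySem.List.pyRange m t 1) (ans + 1) (j + 1)
        have heq' : solWhile order (order.length : Int) (S ++ PySem.List.pyRange m t 1)
            (ans + 1) ((j : Int) + 1) = (S', a', (j' : Int)) := by
          rw [← heq]; norm_cast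
        rw [heq']
        have hS' : ∀ x ∈ S', x < t + 1 := by
          intro x hx
          rcases List.mem_append.mp (hsub.mem hx) with hx' | hx'
          · exact lt_of_lt_of_le (hS x hx') (by omega)
          · have := PySem.List.mem_pyRange_one.mp hx'
            omega
        have hrec := fold_altLoop order (t + 1) (by omega) S' a' j' hS' hfix'
        rw [hrec, ← halt (t + 1), hdrop]
        simp only [altLoop]
        rw [if_neg hnotA, if_pos hrange]
      · intro b hb
        have := PySem.List.mem_pyRange_one.mp hb
        rw [hget]
        intro habs
        have : b = t := Option.some.inj habs
        omega
    · -- unreachable target: B breaks, A pushes everything with no further pops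
      rw [fold_id]
      · rw [hdrop]
        simp only [altLoop]
        rw [if_neg hnotA, if_neg hrange]
      · intro b hb
        have hbm := PySem.List.mem_pyRange_one.mp hb
        rw [hget]
        intro habs
        have : b = t := Option.some.inj habs
        omega
  · -- all of order consumed (or order = []): every remaining step is the identity
    have hnone : PySem.List.pyGet? order (j : Int) = none := by
      rw [PySem.List.pyGet?_natCast, List.getElem?_eq_none hj]
    rw [fold_id, List.drop_eq_nil_of_le hj]
    · rfl
    · intro b _; rw [hnone]; simp
termination_by ((order.length : Int) + 1 - m).toNat
decreasing_by omega

-- ===== VERDICT (by name: the statement is the Claim_ definition above) =====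
theorem solution_spec : Claim_equal_solution := by
  intro order _
  unfold Spec_solution solution solution_alt
  have h := fold_altLoop order 1 le_rfl [] 0 0 (by simp) (by simp)
  simpa using h
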